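-- pv_equiv track=rewrite | github.com/InfectIsFair/webScrapingMess | webScraping.py | searchFormat
-- ===== SOURCE A (Python) =====
-- def searchFormat(arg):
--     puncList = ['`', '¬', '!', '"', '£', '$', '%', '^',' &', '*', '(', ')', '-', '_', '=', '+', '[', ']', '{', '}', ';', ':', '\'', '@', '#', '~',
--             '|', ',', '<', '>', '.', '/', '?'] #list of punctuation, needs to be removed for the URL, but needs to be included in the name for the alt tag
--
--     temp = arg.split(" ")
--     numWords = len(temp)
--     counter = 1
--     arg = ""
--     for word in temp:
--         temp = ''
--         for letter in word:
--             if letter not in puncList: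
--                 temp += letter
--         word = temp
--         arg += word
--         if counter != numWords:
--             arg += "-"
--         counter += 1
--
--     return arg
-- ===== SOURCE B (Python) =====
-- def searchFormat(arg):
--     # Single pass: drop punctuation chars, turn each space into a dash, copy the rest.
--     punct = set('`\u00ac!"\u00a3$%^*()-_=+[]{};:\'@#~|,<>./?')
--     return ''.join('-' if c == ' ' else c for c in arg if c == ' ' or c not in punct)
-- ===== Notes on version B (the rewrite author's own statement) =====
-- stated objective: simpler
-- what changed: Replaced A's split-on-space / per-word punctuation filter / counter-controlled rejoin with a single character pass that drops punctuation and maps each space to a dash.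
import Mathlib
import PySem

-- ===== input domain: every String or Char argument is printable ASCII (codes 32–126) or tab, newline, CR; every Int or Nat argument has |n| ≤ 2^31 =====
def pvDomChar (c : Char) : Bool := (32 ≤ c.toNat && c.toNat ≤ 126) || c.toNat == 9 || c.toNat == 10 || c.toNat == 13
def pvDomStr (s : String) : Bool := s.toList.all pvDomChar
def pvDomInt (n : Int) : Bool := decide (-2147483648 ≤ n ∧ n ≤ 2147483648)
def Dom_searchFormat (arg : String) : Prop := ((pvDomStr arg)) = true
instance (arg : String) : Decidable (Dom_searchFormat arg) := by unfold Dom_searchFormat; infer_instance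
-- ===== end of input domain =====

-- B replaces A's split-on-space / per-word filter / counter-rejoin with one pass over the
-- characters (punctuation dropped, space mapped to '-'); objective: simpler.


-- ===== PORT A =====
-- puncList: Python list of strings (one entry, ' &', has two characters), as List (List Char)
def puncListA : List (List Char) :=
  [['`'], ['¬'], ['!'], ['"'], ['£'], ['$'], ['%'], ['^'], [' ', '&'], ['*'], ['('], [')'],
   ['-'], ['_'], ['='], ['+'], ['['], [']'], ['{'], ['}'], [';'], [':'], ['\''], ['@'], ['#'],
   ['~'], ['|'], [','], ['<'], ['>'], ['.'], ['/'], ['?']]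

def searchFormat (arg : String) : String :=
  let temp := PySem.Chars.splitOn arg.toList [' ']      -- arg.split(" ")
  let numWords := temp.length
  -- for word in temp: filter letters not in puncList, append, dash unless counter == numWords
  let st := temp.foldl (fun (st : List Char × Nat) word =>
      let filtered := word.foldl (fun t letter =>
          if [letter] ∈ puncListA then t else t ++ [letter]) []
      let acc := st.1 ++ filtered
      let acc := if st.2 ≠ numWords then acc ++ ['-'] else acc
      (acc, st.2 + 1)) ([], 1)
  String.ofList st.1

-- ===== PORT B =====
def punctB : List Char :=
  ['`', '¬', '!', '"', '£', '$', '%', '^', '*', '(', ')', '-', '_', '=', '+', '[', ']',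
   '{', '}', ';', ':', '\'', '@', '#', '~', '|', ',', '<', '>', '.', '/', '?']

def searchFormat_alt (arg : String) : String :=
  String.ofList (arg.toList.filterMap (fun c =>
    if c = ' ' then some '-' else if c ∈ punctB then none else some c))

-- ===== PRECONDITION & SPEC =====
def Spec_searchFormat (arg : String) (out : String) : Prop := out = searchFormat_alt arg
instance (arg : String) (out : String) : Decidable (Spec_searchFormat arg out) := by unfold Spec_searchFormat; infer_instance

-- ===== CLAIM (what is proved, stated in full; the proofs are below) =====
def Claim_equal_searchFormat : Prop := ∀ (arg : String), Dom_searchFormat arg → Spec_searchFormat arg (searchFormat arg)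

-- ===== LEMMAS AND PROOFS =====

-- structural split on ' ' (pre = chars of the word being accumulated)
def mySplit (pre : List Char) : List Char → List (List Char)
  | [] => [pre]
  | c :: rest => if c = ' ' then pre :: mySplit [] rest else mySplit (pre ++ [c]) rest

-- dash-join, matching A's "no dash after the last word"
def dashJoin : List (List Char) → List Char
  | [] => []
  | [w] => w
  | w :: ws => w ++ '-' :: dashJoin ws

-- A's inner filter loop
def Fw (w : List Char) : List Char :=
  w.foldl (fun t letter => if [letter] ∈ puncListA then t else t ++ [letter]) []

def fB (c : Char) : Option Char :=
  if c = ' ' then some '-' else if c ∈ punctB then none else some c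

lemma mySplit_ne_nil (pre : List Char) (cs : List Char) : mySplit pre cs ≠ [] := by
  induction cs generalizing pre with
  | nil => simp [mySplit]
  | cons c rest ih =>
    simp only [mySplit]
    split_ifs
    · simp
    · exact ih _

lemma dashJoin_cons (w : List Char) (ws : List (List Char)) (h : ws ≠ []) :
    dashJoin (w :: ws) = w ++ '-' :: dashJoin ws := by
  cases ws with
  | nil => exact absurd rfl h
  | cons a l => rfl

lemma go_eq (fuel : Nat) (l cur : List Char) (accs : List (List Char))
    (h : l.length ≤ fuel) :
    PySem.Chars.splitOn.go [' '] fuel l cur accs = accs.reverse ++ mySplit cur.reverse l := by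
  induction fuel generalizing l cur accs with
  | zero =>
    have : l = [] := List.length_eq_zero_iff.mp (Nat.le_zero.mp h)
    subst this
    simp [PySem.Chars.splitOn.go, mySplit]
  | succ n ih =>
    cases l with
    | nil => simp [PySem.Chars.splitOn.go, mySplit]
    | cons c rest =>
      simp only [PySem.Chars.splitOn.go]
      by_cases hc : c = ' '
      · subst hc
        have hp : List.isPrefixOf [' '] (' ' :: rest) = true := by
          simp [List.isPrefixOf]
        rw [if_pos hp]
        simp only [List.length_cons] at h
        rw [ih _ _ _ (by simpa using Nat.le_of_succ_le_succ h)]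
        simp [mySplit]
      · have hp : ¬ (List.isPrefixOf [' '] (c :: rest) = true) := by
          simp [List.isPrefixOf]
          intro h'; exact hc h'.symm
        rw [if_neg hp]
        simp only [List.length_cons] at h
        rw [ih _ _ _ (Nat.le_of_succ_le_succ h)]
        simp [mySplit, hc]

lemma splitOn_eq (cs : List Char) : PySem.Chars.splitOn cs [' '] = mySplit [] cs := by
  unfold PySem.Chars.splitOn
  rw [go_eq (cs.length + 1) cs [] [] (by omega)]
  simp

lemma memA_iff (c : Char) : ([c] ∈ puncListA) ↔ (c ∈ punctB) := by
  simp [puncListA, punctB]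

lemma Fw_append (w : List Char) (c : Char) :
    Fw (w ++ [c]) = Fw w ++ (if [c] ∈ puncListA then [] else [c]) := by
  simp only [Fw, List.foldl_append, List.foldl_cons, List.foldl_nil]
  split_ifs <;> simp

-- the counter/foldl loop of A produces a dash-join
lemma fold_eq (n : Nat) (ws : List (List Char)) :
    ∀ (i : Nat) (init : List Char), i + ws.length = n + 1 →
    (ws.foldl (fun (st : List Char × Nat) word =>
        (if st.2 ≠ n then
            st.1 ++ word.foldl (fun t letter =>
              if [letter] ∈ puncListA then t else t ++ [letter]) [] ++ ['-']
          else
            st.1 ++ word.foldl (fun t letter =>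
              if [letter] ∈ puncListA then t else t ++ [letter]) [],
         st.2 + 1)) (init, i)).1 = init ++ dashJoin (ws.map Fw) := by
  induction ws with
  | nil => intro i init _; simp [dashJoin]
  | cons w rest ih =>
    intro i init h
    rw [List.foldl_cons]
    by_cases hi : i = n
    · have hr : rest = [] := by
        simp only [List.length_cons] at h
        exact List.length_eq_zero_iff.mp (by omega)
      subst hr
      simp [hi, dashJoin, Fw]
    · have hr : rest ≠ [] := by
        intro e; subst e; simp at h; omega
      simp only [ne_eq, hi, not_false_eq_true, if_true]
      rw [ih (i+1) _ (by simp only [List.length_cons] at h ⊢; omega)]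
      rw [List.map_cons, dashJoin_cons _ _ (fun e => hr (List.map_eq_nil_iff.mp e))]
      simp [Fw]

-- dash-join of the filtered split equals the single-pass filterMap
lemma dashJoin_split (cs : List Char) : ∀ pre : List Char,
    dashJoin ((mySplit pre cs).map Fw) = Fw pre ++ cs.filterMap fB := by
  induction cs with
  | nil => intro pre; simp [mySplit, dashJoin]
  | cons c rest ih =>
    intro pre
    by_cases hc : c = ' '
    · subst hc
      rw [show mySplit pre (' ' :: rest) = pre :: mySplit [] rest from by simp [mySplit]]
      rw [List.map_cons,
        dashJoin_cons _ _ (fun e => mySplit_ne_nil [] rest (List.map_eq_nil_iff.mp e)), ih []]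
      simp [Fw, fB]
    · simp only [mySplit, if_neg hc]
      rw [ih (pre ++ [c]), Fw_append]
      by_cases hm : [c] ∈ puncListA
      · simp [hm, fB, hc, (memA_iff c).mp hm]
      · have : c ∉ punctB := fun h => hm ((memA_iff c).mpr h)
        simp [hm, fB, hc, this]

-- ===== VERDICT (by name: the statement is the Claim_ definition above) =====
theorem searchFormat_spec : Claim_equal_searchFormat := by
  intro arg _
  show searchFormat arg = searchFormat_alt arg
  unfold searchFormat searchFormat_alt
  simp only [splitOn_eq]
  rw [fold_eq (mySplit [] arg.toList).length _ 1 [] (by omega)]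
  rw [dashJoin_split arg.toList []]
  simp [Fw, fB]
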